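-- pv_equiv track=rewrite | github.com/kaandrmz/patch_level_dp | src/patch_level_dp/privacy/calculations.py | generate_dual_circle_pixels
-- ===== SOURCE A (Python) =====
-- from typing import Tuple, List, Union
--
-- def generate_dual_circle_pixels(size: int) -> List[Tuple[int, int]]:
--     """Generate pixel coordinates for two circles side by side (distributed cluster).
--
--     Creates two circles with approximately size^2/2 pixels each, for a total of ~size^2 pixels.
--     The circles are separated by a small gap.
--
--     Args:
--         size: Size parameter that determines the scale (total area ≈ size^2)
--
--     Returns:
--         List of (x, y) pixel coordinates forming the dual circle cluster
--     """
--     # For size=10, we want ~100 pixels total, so ~50 pixels per circle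
--     # π*r^2 = size^2/2, so r = size/sqrt(2π) ≈ size * 0.4
--     import math
--     radius = int(size * 0.4)
--
--     # Spacing between circle centers
--     gap = radius // 2  # Small gap between circles
--     center_offset = radius + gap // 2
--
--     pixels = []
--     # Box needs to fit both circles side by side
--     box_width = 2 * center_offset + 2 * radius + 1
--     box_height = 2 * radius + 1
--
--     # Left circle center
--     left_center_x = radius
--     center_y = radius
--
--     # Right circle center
--     right_center_x = radius + 2 * center_offset
--
--     for x in range(box_width):
--         for y in range(box_height):
--             # Check if pixel is in left circle
--             dist_left = (x - left_center_x) ** 2 + (y - center_y) ** 2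
--             in_left_circle = dist_left <= radius ** 2
--
--             # Check if pixel is in right circle
--             dist_right = (x - right_center_x) ** 2 + (y - center_y) ** 2
--             in_right_circle = dist_right <= radius ** 2
--
--             # Add pixel if it's in either circle
--             if in_left_circle or in_right_circle:
--                 pixels.append((x, y))
--
--     return pixels
-- ===== SOURCE B (Python) =====
-- import math
--
-- def generate_dual_circle_pixels(size):
--     """Column-wise: per x compute the half-chord of each circle by isqrt and
--     emit the one centered y-interval (both circles share center_y), skipping
--     empty columns entirely."""
--     radius = int(size * 0.4)
--     gap = radius // 2
--     center_offset = radius + gap // 2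
--     box_width = 2 * center_offset + 2 * radius + 1
--     center_y = radius
--     left_cx = radius
--     right_cx = radius + 2 * center_offset
--     r2 = radius * radius
--     pixels = []
--     for x in range(box_width):
--         best = -1
--         dl = x - left_cx
--         if dl * dl <= r2:
--             best = math.isqrt(r2 - dl * dl)
--         dr = x - right_cx
--         if dr * dr <= r2:
--             h = math.isqrt(r2 - dr * dr)
--             if h > best:
--                 best = h
--         if best >= 0:
--             for y in range(center_y - best, center_y + best + 1):
--                 pixels.append((x, y))
--     return pixels
-- ===== Notes on version B (the rewrite author's own statement) =====
-- stated objective: faster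
-- what changed: Instead of testing every pixel of the bounding box against both circle equations, B computes per column the half-chord of each circle with math.isqrt and emits that column's single centered y-interval directly, skipping columns neither circle reaches.
import Mathlib
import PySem

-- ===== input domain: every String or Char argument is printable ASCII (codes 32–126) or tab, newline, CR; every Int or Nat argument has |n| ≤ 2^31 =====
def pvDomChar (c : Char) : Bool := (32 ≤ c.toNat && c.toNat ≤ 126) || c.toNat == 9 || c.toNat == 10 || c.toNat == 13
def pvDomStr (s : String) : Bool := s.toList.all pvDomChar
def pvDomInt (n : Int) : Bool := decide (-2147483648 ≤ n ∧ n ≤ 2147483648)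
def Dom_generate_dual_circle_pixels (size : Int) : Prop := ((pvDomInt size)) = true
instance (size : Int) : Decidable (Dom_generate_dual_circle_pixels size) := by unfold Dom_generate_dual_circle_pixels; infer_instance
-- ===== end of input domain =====

-- B replaces A's per-pixel distance test over the whole bounding box by a per-column
-- half-chord computation (isqrt), emitting each column's single centered y-interval.


-- ===== PORT A =====
def generate_dual_circle_pixels (size : Int) : List (Int × Int) :=
  -- int(size * 0.4) ported as the truncating division (2*size)/5: exact for |size| ≤ 2^31
  -- (the double product size*0.4 never crosses an integer boundary in that range)
  let radius : Int := Int.tdiv (2 * size) 5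
  let gap : Int := PySem.Int.floordiv radius 2
  let center_offset : Int := radius + PySem.Int.floordiv gap 2
  let box_width : Int := 2 * center_offset + 2 * radius + 1
  let box_height : Int := 2 * radius + 1
  let left_center_x : Int := radius
  let center_y : Int := radius
  let right_center_x : Int := radius + 2 * center_offset
  (PySem.List.pyRange 0 box_width 1).foldl (fun pixels x =>
    (PySem.List.pyRange 0 box_height 1).foldl (fun pixels y =>
      let dist_left := (x - left_center_x) ^ 2 + (y - center_y) ^ 2
      let in_left_circle : Bool := decide (dist_left ≤ radius ^ 2)
      let dist_right := (x - right_center_x) ^ 2 + (y - center_y) ^ 2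
      let in_right_circle : Bool := decide (dist_right ≤ radius ^ 2)
      if in_left_circle || in_right_circle then pixels ++ [(x, y)] else pixels) pixels) []

-- ===== PORT B =====
def generate_dual_circle_pixels_alt (size : Int) : List (Int × Int) :=
  -- int(size * 0.4): same exact port as in A.  math.isqrt m = Nat.sqrt m.toNat, exact since m ≥ 0 at both call sites.
  let radius : Int := Int.tdiv (2 * size) 5
  let gap : Int := PySem.Int.floordiv radius 2
  let center_offset : Int := radius + PySem.Int.floordiv gap 2
  let box_width : Int := 2 * center_offset + 2 * radius + 1
  let center_y : Int := radius
  let left_cx : Int := radius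
  let right_cx : Int := radius + 2 * center_offset
  let r2 : Int := radius * radius
  (PySem.List.pyRange 0 box_width 1).foldl (fun pixels x =>
    let dl := x - left_cx
    let best0 : Int := if dl * dl ≤ r2 then ((r2 - dl * dl).toNat.sqrt : Int) else -1
    let dr := x - right_cx
    let best : Int :=
      if dr * dr ≤ r2 then
        let h : Int := ((r2 - dr * dr).toNat.sqrt : Int)
        if h > best0 then h else best0
      else best0
    if best ≥ 0 then
      (PySem.List.pyRange (center_y - best) (center_y + best + 1) 1).foldl
        (fun pixels y => pixels ++ [(x, y)]) pixels
    else pixels) []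

-- ===== PRECONDITION & SPEC =====
def Spec_generate_dual_circle_pixels (size : Int) (out : List (Int × Int)) : Prop := out = generate_dual_circle_pixels_alt size
instance (size : Int) (out : List (Int × Int)) : Decidable (Spec_generate_dual_circle_pixels size out) := by unfold Spec_generate_dual_circle_pixels; infer_instance

-- ===== CLAIM (what is proved, stated in full; the proofs are below) =====
def Claim_equal_generate_dual_circle_pixels : Prop := ∀ (size : Int), Dom_generate_dual_circle_pixels size → Spec_generate_dual_circle_pixels size (generate_dual_circle_pixels size)

-- ===== LEMMAS AND PROOFS =====

lemma pv_flatMap_ite {α β : Type} (l : List α) (p : α → Bool) (f : α → β) :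
    (l.flatMap fun y => if p y = true then [f y] else []) = (l.filter p).map f := by
  induction l with
  | nil => rfl
  | cons a t ih => by_cases h : p a <;> simp [List.flatMap_cons, h, ih]

lemma pv_ite_append {α : Type} {c : Prop} [Decidable c] (acc m : List α) :
    (if c then acc ++ m else acc) = acc ++ (if c then m else []) := by
  split <;> simp

lemma pv_sq_le_iff (d s : Int) (hs : 0 ≤ s) :
    d * d ≤ s ↔ (-(Nat.sqrt s.toNat : Int) ≤ d ∧ d ≤ (Nat.sqrt s.toNat : Int)) := by
  have h1 : d * d ≤ s ↔ d.natAbs * d.natAbs ≤ s.toNat := by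
    rw [← Int.natAbs_mul_self]; omega
  rw [h1, ← Nat.le_sqrt]
  generalize Nat.sqrt s.toNat = k
  omega

lemma pv_sqrt_le_r (r d : Int) (hr : 0 ≤ r) : ((r * r - d * d).toNat.sqrt : Int) ≤ r := by
  have h2 : ((r.toNat : Int)) = r := Int.toNat_of_nonneg hr
  have h1 : (r * r - d * d).toNat ≤ r.toNat * r.toNat := by
    apply Int.toNat_le.mpr
    push_cast [h2]
    nlinarith [mul_self_nonneg d]
  have h3 := Nat.sqrt_le_sqrt h1
  rw [Nat.sqrt_eq] at h3
  omega

lemma pv_filter_interval (a b c d : Int) (h1 : a ≤ c) (h2 : c ≤ d + 1) (h3 : d + 1 ≤ b)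
    (p : Int → Bool) (hp : ∀ y, p y = true ↔ (c ≤ y ∧ y ≤ d)) :
    (PySem.List.pyRange a b 1).filter p = PySem.List.pyRange c (d + 1) 1 := by
  rw [PySem.List.pyRange_one_append a c b h1 (by omega),
      PySem.List.pyRange_one_append c (d + 1) b h2 h3,
      List.filter_append, List.filter_append]
  have e1 : (PySem.List.pyRange a c 1).filter p = [] := by
    apply List.filter_eq_nil_iff.mpr
    intro y hy
    have hb := PySem.List.mem_pyRange_one.mp hy
    simp only [hp]; omega
  have e2 : (PySem.List.pyRange c (d + 1) 1).filter p = PySem.List.pyRange c (d + 1) 1 := by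
    apply List.filter_eq_self.mpr
    intro y hy
    have hb := PySem.List.mem_pyRange_one.mp hy
    simp only [hp]; omega
  have e3 : (PySem.List.pyRange (d + 1) b 1).filter p = [] := by
    apply List.filter_eq_nil_iff.mpr
    intro y hy
    have hb := PySem.List.mem_pyRange_one.mp hy
    simp only [hp]; omega
  rw [e1, e2, e3, List.nil_append, List.append_nil]

-- the per-column equality: A's filtered column equals B's centered interval (K = the larger half-chord)
lemma pv_col_some (r dl dr x : Int) (K : Int) (hK0 : 0 ≤ K) (hKr : K ≤ r)
    (hiff : ∀ y : Int, (dl * dl + (y - r) * (y - r) ≤ r * r ∨ dr * dr + (y - r) * (y - r) ≤ r * r)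
        ↔ (r - K ≤ y ∧ y ≤ r + K)) :
    ((PySem.List.pyRange 0 (2 * r + 1) 1).filter
        (fun y => decide (dl * dl + (y - r) * (y - r) ≤ r * r) ||
                  decide (dr * dr + (y - r) * (y - r) ≤ r * r))).map (fun y => (x, y))
    = (PySem.List.pyRange (r - K) (r + K + 1) 1).map (fun y => (x, y)) := by
  congr 1
  have h : r + K + 1 = (r + K) + 1 := by ring
  rw [h]
  apply pv_filter_interval 0 (2 * r + 1) (r - K) (r + K) (by omega) (by omega) (by omega)
  intro y
  simp only [Bool.or_eq_true, decide_eq_true_eq]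
  exact hiff y

lemma pv_col_none (r dl dr x : Int)
    (hl : ¬ dl * dl ≤ r * r) (hR : ¬ dr * dr ≤ r * r) :
    ((PySem.List.pyRange 0 (2 * r + 1) 1).filter
        (fun y => decide (dl * dl + (y - r) * (y - r) ≤ r * r) ||
                  decide (dr * dr + (y - r) * (y - r) ≤ r * r))).map (fun y => (x, y))
    = ([] : List (Int × Int)) := by
  have h : (PySem.List.pyRange 0 (2 * r + 1) 1).filter
        (fun y => decide (dl * dl + (y - r) * (y - r) ≤ r * r) ||
                  decide (dr * dr + (y - r) * (y - r) ≤ r * r)) = [] := by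
    apply List.filter_eq_nil_iff.mpr
    intro y _
    simp only [Bool.or_eq_true, decide_eq_true_eq]
    push Not
    constructor <;> nlinarith [mul_self_nonneg (y - r)]
  rw [h, List.map_nil]

lemma pv_main (size : Int) : generate_dual_circle_pixels size = generate_dual_circle_pixels_alt size := by
  simp only [generate_dual_circle_pixels, generate_dual_circle_pixels_alt, pow_two]
  generalize Int.tdiv (2 * size) 5 = r
  have e1 := PySem.Int.floordiv_mul_add_mod r 2
  have m1a := PySem.Int.mod_nonneg r (by norm_num : (0:Int) < 2)
  have m1b := PySem.Int.mod_lt r (by norm_num : (0:Int) < 2)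
  have e2 := PySem.Int.floordiv_mul_add_mod (PySem.Int.floordiv r 2) 2
  have m2a := PySem.Int.mod_nonneg (PySem.Int.floordiv r 2) (by norm_num : (0:Int) < 2)
  have m2b := PySem.Int.mod_lt (PySem.Int.floordiv r 2) (by norm_num : (0:Int) < 2)
  generalize hq2 : PySem.Int.floordiv (PySem.Int.floordiv r 2) 2 = q2 at *
  simp only [PySem.List.foldl_append_singleton_eq_map, pv_ite_append,
    PySem.List.foldl_append_eq_flatMap, List.nil_append]
  apply List.flatMap_congr
  intro x hx
  have hxb := PySem.List.mem_pyRange_one.mp hx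
  have hr : 0 ≤ r := by omega
  rw [pv_flatMap_ite]
  by_cases hl : (x - r) * (x - r) ≤ r * r <;>
    by_cases hR : (x - (r + 2 * (r + q2))) * (x - (r + 2 * (r + q2))) ≤ r * r
  · -- both circles reach this column
    simp only [if_pos hl, if_pos hR]
    set k1 : Int := ((r * r - (x - r) * (x - r)).toNat.sqrt : Int) with hk1
    set k2 : Int := ((r * r - (x - (r + 2 * (r + q2))) * (x - (r + 2 * (r + q2)))).toNat.sqrt : Int) with hk2
    have hk10 : 0 ≤ k1 := by positivity
    have hk20 : 0 ≤ k2 := by positivity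
    have hk1r : k1 ≤ r := pv_sqrt_le_r r _ hr
    have hk2r : k2 ≤ r := pv_sqrt_le_r r _ hr
    have i1 := fun y : Int => pv_sq_le_iff (y - r) (r * r - (x - r) * (x - r)) (by linarith)
    have i2 := fun y : Int => pv_sq_le_iff (y - r)
      (r * r - (x - (r + 2 * (r + q2))) * (x - (r + 2 * (r + q2)))) (by linarith)
    by_cases hc : k2 > k1
    · rw [if_pos hc, if_pos (by omega : k2 ≥ 0)]
      apply pv_col_some r _ _ x k2 hk20 hk2r
      intro y
      have a1 : (x - r) * (x - r) + (y - r) * (y - r) ≤ r * r ↔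
          (y - r) * (y - r) ≤ r * r - (x - r) * (x - r) := by constructor <;> intro <;> linarith
      have a2 : (x - (r + 2 * (r + q2))) * (x - (r + 2 * (r + q2))) + (y - r) * (y - r) ≤ r * r ↔
          (y - r) * (y - r) ≤ r * r - (x - (r + 2 * (r + q2))) * (x - (r + 2 * (r + q2))) := by
        constructor <;> intro <;> linarith
      rw [a1, a2, i1 y, i2 y, ← hk1, ← hk2]
      omega
    · rw [if_neg hc, if_pos (by omega : k1 ≥ 0)]
      apply pv_col_some r _ _ x k1 hk10 hk1r
      intro y
      have a1 : (x - r) * (x - r) + (y - r) * (y - r) ≤ r * r ↔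
          (y - r) * (y - r) ≤ r * r - (x - r) * (x - r) := by constructor <;> intro <;> linarith
      have a2 : (x - (r + 2 * (r + q2))) * (x - (r + 2 * (r + q2))) + (y - r) * (y - r) ≤ r * r ↔
          (y - r) * (y - r) ≤ r * r - (x - (r + 2 * (r + q2))) * (x - (r + 2 * (r + q2))) := by
        constructor <;> intro <;> linarith
      rw [a1, a2, i1 y, i2 y, ← hk1, ← hk2]
      omega
  · -- only the left circle reaches this column
    simp only [if_pos hl, if_neg hR]
    set k1 : Int := ((r * r - (x - r) * (x - r)).toNat.sqrt : Int) with hk1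
    have hk10 : 0 ≤ k1 := by positivity
    rw [if_pos (by omega : k1 ≥ 0)]
    apply pv_col_some r _ _ x k1 hk10 (pv_sqrt_le_r r _ hr)
    intro y
    have i1 := pv_sq_le_iff (y - r) (r * r - (x - r) * (x - r)) (by linarith)
    have a1 : (x - r) * (x - r) + (y - r) * (y - r) ≤ r * r ↔
        (y - r) * (y - r) ≤ r * r - (x - r) * (x - r) := by constructor <;> intro <;> linarith
    have a2 : ¬ ((x - (r + 2 * (r + q2))) * (x - (r + 2 * (r + q2))) + (y - r) * (y - r) ≤ r * r) := by
      nlinarith [mul_self_nonneg (y - r)]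
    rw [a1, i1, ← hk1]
    constructor
    · rintro (h | h)
      · omega
      · exact absurd h a2
    · intro h; left; omega
  · -- only the right circle reaches this column
    simp only [if_pos hR, if_neg hl]
    set k2 : Int := ((r * r - (x - (r + 2 * (r + q2))) * (x - (r + 2 * (r + q2)))).toNat.sqrt : Int) with hk2
    have hk20 : 0 ≤ k2 := by positivity
    rw [if_pos (by omega : k2 > (-1:Int)), if_pos (by omega : k2 ≥ 0)]
    apply pv_col_some r _ _ x k2 hk20 (pv_sqrt_le_r r _ hr)
    intro y
    have i2 := pv_sq_le_iff (y - r) (r * r - (x - (r + 2 * (r + q2))) * (x - (r + 2 * (r + q2)))) (by linarith)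
    have a2 : (x - (r + 2 * (r + q2))) * (x - (r + 2 * (r + q2))) + (y - r) * (y - r) ≤ r * r ↔
        (y - r) * (y - r) ≤ r * r - (x - (r + 2 * (r + q2))) * (x - (r + 2 * (r + q2))) := by
      constructor <;> intro <;> linarith
    have a1 : ¬ ((x - r) * (x - r) + (y - r) * (y - r) ≤ r * r) := by
      nlinarith [mul_self_nonneg (y - r)]
    rw [a2, i2, ← hk2]
    constructor
    · rintro (h | h)
      · exact absurd h a1
      · omega
    · intro h; right; omega
  · -- neither circle reaches this column
    simp only [if_neg hl, if_neg hR]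
    rw [if_neg (by omega : ¬ ((-1:Int) ≥ 0))]
    exact pv_col_none r _ _ x hl hR

-- ===== VERDICT (by name: the statement is the Claim_ definition above) =====
theorem generate_dual_circle_pixels_spec : Claim_equal_generate_dual_circle_pixels := by
  intro size _
  unfold Spec_generate_dual_circle_pixels
  exact pv_main size
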